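-- pv_equiv track=rewrite | github.com/bndl/bndl | bndl/compute/cassandra/partitioner.py | repartition
-- ===== SOURCE A (Python) =====
-- def repartition(partitions, min_pcount):
--     while len(partitions) < min_pcount:
--         repartitioned = []
--         for replicas, token_ranges in partitions:
--             if len(token_ranges) == 1:
--                 repartitioned.append((replicas, token_ranges))
--                 continue
--             mid = len(token_ranges) // 2
--             repartitioned.append((replicas, token_ranges[:mid]))
--             repartitioned.append((replicas, token_ranges[mid:]))
--         if len(repartitioned) == len(partitions):
--             break
--         partitions = repartitioned
--     return partitions
-- ===== SOURCE B (Python) =====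
-- def repartition(partitions, min_pcount):
--     # Number of chunks a list of length n falls into after r halving rounds
--     # (a round leaves single-element lists alone and splits the rest at the middle).
--     def pieces(n, r):
--         if r == 0 or n == 1:
--             return 1
--         return pieces(n // 2, r - 1) + pieces(n - n // 2, r - 1)
--
--     sizes = [len(token_ranges) for _, token_ranges in partitions]
--
--     def count(r):
--         return sum(pieces(s, r) for s in sizes)
--
--     r = 0
--     while count(r) < min_pcount and count(r + 1) > count(r):
--         r += 1
--
--     # Split xs in half, d rounds deep.
--     def chunks(xs, d):
--         if d == 0 or len(xs) == 1:
--             return [xs]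
--         mid = len(xs) // 2
--         return chunks(xs[:mid], d - 1) + chunks(xs[mid:], d - 1)
--
--     return [(replicas, c) for replicas, token_ranges in partitions
--             for c in chunks(token_ranges, r)]
-- ===== Notes on version B (the rewrite author's own statement) =====
-- stated objective: alternative
-- what changed: Instead of rebuilding and re-slicing the whole partition list round after round, B first determines the number of halving rounds from the token-list sizes (via a natural recursion counting how many chunks a length-n list splits into after r rounds) and then emits each partition's chunks with one direct recursive split to that depth.
import Mathlib
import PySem

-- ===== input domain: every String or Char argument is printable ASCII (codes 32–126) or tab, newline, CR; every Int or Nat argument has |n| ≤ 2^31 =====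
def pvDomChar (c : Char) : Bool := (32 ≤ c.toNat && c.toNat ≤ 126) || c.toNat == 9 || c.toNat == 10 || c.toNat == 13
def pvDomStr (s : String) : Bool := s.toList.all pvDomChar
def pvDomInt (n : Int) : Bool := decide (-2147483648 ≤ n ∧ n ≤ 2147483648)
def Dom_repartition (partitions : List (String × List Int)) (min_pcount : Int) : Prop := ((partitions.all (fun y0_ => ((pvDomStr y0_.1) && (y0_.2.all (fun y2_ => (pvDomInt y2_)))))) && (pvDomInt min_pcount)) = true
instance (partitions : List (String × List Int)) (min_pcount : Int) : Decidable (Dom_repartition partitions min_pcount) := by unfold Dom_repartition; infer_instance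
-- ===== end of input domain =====

-- B changes the algorithm: instead of rebuilding (and re-slicing) the whole partition list
-- round after round, it determines the number of halving rounds from the token-list sizes
-- and then emits each partition's chunks by one direct recursive split
-- (objective: alternative — a genuinely different strategy of similar measured cost).

-- ===== PORT A =====
-- the body of A's inner `for` loop (append the partition, or its two slice halves)
def stepBody (repartitioned : List (String × List Int)) (pr : String × List Int) :
    List (String × List Int) :=
  if pr.2.length == 1 then
    repartitioned ++ [pr]
  else
    let mid : Nat := pr.2.length / 2
    (repartitioned ++ [(pr.1, PySem.List.slice pr.2 none (some (mid : Int)))]) ++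
      [(pr.1, PySem.List.slice pr.2 (some (mid : Int)) none)]

-- one pass of A's inner `for` loop (building `repartitioned` by appends)
def stepA (partitions : List (String × List Int)) : List (String × List Int) :=
  partitions.foldl stepBody []

-- A's `while` loop; the fuel only makes the recursion structural: it equals the loop's
-- termination measure min_pcount - len(partitions) (the length grows by ≥ 1 per kept round,
-- and at fuel 0 the guard is necessarily false), so it never cuts the loop short
def repartitionLoop (fuel : Nat) (partitions : List (String × List Int)) (min_pcount : Int) :
    List (String × List Int) :=
  match fuel with
  | 0 => partitions
  | fuel + 1 =>
    if (partitions.length : Int) < min_pcount then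
      let repartitioned := stepA partitions
      if repartitioned.length = partitions.length then partitions
      else repartitionLoop fuel repartitioned min_pcount
    else partitions

def repartition (partitions : List (String × List Int)) (min_pcount : Int) :
    List (String × List Int) :=
  repartitionLoop (min_pcount - partitions.length).toNat partitions min_pcount

-- ===== PORT B =====
-- number of chunks a list of length n falls into after r halving rounds
def piecesB (n : Nat) (r : Nat) : Nat :=
  match r with
  | 0 => 1
  | r + 1 => if n == 1 then 1 else piecesB (n / 2) r + piecesB (n - n / 2) r

def countB (sizes : List Nat) (r : Nat) : Nat :=
  (sizes.map (fun s => piecesB s r)).sum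

-- B's round-counting `while` loop; as in A's port the fuel is the loop's own termination
-- measure (the count grows by ≥ 1 per iteration and at fuel 0 the guard is necessarily false)
def rloopB (sizes : List Nat) (min_pcount : Int) (fuel : Nat) (r : Nat) : Nat :=
  match fuel with
  | 0 => r
  | fuel + 1 =>
    if (countB sizes r : Int) < min_pcount ∧ countB sizes (r + 1) > countB sizes r then
      rloopB sizes min_pcount fuel (r + 1)
    else r

-- split xs in half, d rounds deep
def chunksB (xs : List Int) (d : Nat) : List (List Int) :=
  match d with
  | 0 => [xs]
  | d + 1 =>
    if xs.length == 1 then [xs]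
    else
      let mid : Nat := xs.length / 2
      chunksB (PySem.List.slice xs none (some (mid : Int))) d ++
        chunksB (PySem.List.slice xs (some (mid : Int)) none) d

def repartition_alt (partitions : List (String × List Int)) (min_pcount : Int) :
    List (String × List Int) :=
  let sizes := partitions.map (fun pr => pr.2.length)
  let r := rloopB sizes min_pcount (min_pcount - (countB sizes 0 : Int)).toNat 0
  partitions.flatMap (fun pr => (chunksB pr.2 r).map (fun c => (pr.1, c)))

-- ===== PRECONDITION & SPEC =====
def Spec_repartition (partitions : List (String × List Int)) (min_pcount : Int) (out : List (String × List Int)) : Prop := out = repartition_alt partitions min_pcount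
instance (partitions : List (String × List Int)) (min_pcount : Int) (out : List (String × List Int)) : Decidable (Spec_repartition partitions min_pcount out) := by unfold Spec_repartition; infer_instance

-- ===== CLAIM (what is proved, stated in full; the proofs are below) =====
def Claim_equal_repartition : Prop := ∀ (partitions : List (String × List Int)) (min_pcount : Int), Dom_repartition partitions min_pcount → Spec_repartition partitions min_pcount (repartition partitions min_pcount)

-- ===== LEMMAS AND PROOFS =====

-- one split of a single chunk, as a function (A's loop body per element, on the token list)
def split1 (xs : List Int) : List (List Int) :=
  if xs.length = 1 then [xs] else [xs.take (xs.length / 2), xs.drop (xs.length / 2)]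

theorem stepBody_eq (acc : List (String × List Int)) (pr : String × List Int) :
    stepBody acc pr = acc ++ (split1 pr.2).map (fun c => (pr.1, c)) := by
  simp only [stepBody, split1, PySem.List.slice_to_natCast, PySem.List.slice_from_natCast]
  by_cases h : pr.2.length = 1 <;> simp [h]

theorem stepA_eq_flatMap (partitions : List (String × List Int)) :
    stepA partitions
      = partitions.flatMap (fun pr => (split1 pr.2).map (fun c => (pr.1, c))) := by
  unfold stepA
  have hfun : stepBody = fun (acc : List (String × List Int)) pr =>
      acc ++ (split1 pr.2).map (fun c => (pr.1, c)) := by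
    funext acc pr; exact stepBody_eq acc pr
  rw [hfun, PySem.List.foldl_append_eq_flatMap]
  simp

theorem chunksB_succ_def (xs : List Int) (r : Nat) :
    chunksB xs (r + 1)
      = if xs.length = 1 then [xs]
        else chunksB (xs.take (xs.length / 2)) r ++ chunksB (xs.drop (xs.length / 2)) r := by
  rw [chunksB]
  simp only [PySem.List.slice_to_natCast, PySem.List.slice_from_natCast, beq_iff_eq]

-- applying one round to the depth-r chunks gives the depth-(r+1) chunks
theorem chunksB_succ (xs : List Int) (r : Nat) :
    chunksB xs (r + 1) = (chunksB xs r).flatMap split1 := by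
  induction r generalizing xs with
  | zero =>
    rw [chunksB_succ_def]
    simp [chunksB, split1]
  | succ r ih =>
    by_cases h : xs.length = 1
    · simp [h, split1, chunksB]
    · rw [chunksB_succ_def xs (r + 1), chunksB_succ_def xs r, if_neg h, if_neg h,
        List.flatMap_append, ih, ih]

def emit (partitions : List (String × List Int)) (r : Nat) : List (String × List Int) :=
  partitions.flatMap (fun pr => (chunksB pr.2 r).map (fun c => (pr.1, c)))

theorem emit_zero (partitions : List (String × List Int)) : emit partitions 0 = partitions := by
  simp [emit, chunksB]

theorem flatMap_split1_map (a : String) (L : List (List Int)) :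
    (L.map (fun c => (a, c))).flatMap (fun pr => (split1 pr.2).map (fun c => (pr.1, c)))
      = (L.flatMap split1).map (fun c => (a, c)) := by
  induction L with
  | nil => simp
  | cons c t ih => simp only [List.map_cons, List.flatMap_cons, List.map_append, ih]

theorem stepA_emit (partitions : List (String × List Int)) (r : Nat) :
    stepA (emit partitions r) = emit partitions (r + 1) := by
  rw [stepA_eq_flatMap]
  unfold emit
  induction partitions with
  | nil => simp
  | cons p t ih =>
    simp only [List.flatMap_cons, List.flatMap_append, ih, flatMap_split1_map, chunksB_succ]

theorem length_chunksB (xs : List Int) (r : Nat) :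
    (chunksB xs r).length = piecesB xs.length r := by
  induction r generalizing xs with
  | zero => simp [chunksB, piecesB]
  | succ r ih =>
    rw [chunksB_succ_def, piecesB]
    by_cases h : xs.length = 1
    · simp [h]
    · have hb : (xs.length == 1) = false := by simp [h]
      simp only [h, if_false, hb, Bool.false_eq_true, List.length_append, ih,
        List.length_take, List.length_drop]
      congr 1
      congr 1
      omega

theorem length_emit (partitions : List (String × List Int)) (r : Nat) :
    (emit partitions r).length = countB (partitions.map (fun pr => pr.2.length)) r := by
  induction partitions with
  | nil => simp [emit, countB]
  | cons p t ih =>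
    simp only [emit, List.flatMap_cons, List.length_append, List.length_map, List.map_cons,
      countB, List.sum_cons] at *
    rw [length_chunksB, ih]

theorem piecesB_mono (n r : Nat) : piecesB n r ≤ piecesB n (r + 1) := by
  induction r generalizing n with
  | zero =>
    rw [piecesB, piecesB]
    by_cases h : n = 1
    · simp [h]
    · have hb : (n == 1) = false := by simp [h]
      simp [hb, piecesB]
  | succ r ih =>
    rw [piecesB, piecesB]
    by_cases h : n = 1
    · simp [h]
    · have hb : (n == 1) = false := by simp [h]
      simp only [hb, Bool.false_eq_true, if_false]
      exact Nat.add_le_add (ih _) (ih _)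

theorem countB_mono (sizes : List Nat) (r : Nat) : countB sizes r ≤ countB sizes (r + 1) := by
  unfold countB
  induction sizes with
  | nil => simp
  | cons s t ih =>
    simp only [List.map_cons, List.sum_cons]
    exact Nat.add_le_add (piecesB_mono s r) ih

theorem countB_zero (sizes : List Nat) : countB sizes 0 = sizes.length := by
  unfold countB
  induction sizes with
  | nil => simp
  | cons s t ih =>
    simp only [List.map_cons, List.sum_cons, ih, List.length_cons]
    rw [show piecesB s 0 = 1 from rfl]
    omega

theorem loop_emit (partitions : List (String × List Int)) (min_pcount : Int) (fuel : Nat)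
    (r : Nat)
    (hfuel : (min_pcount - (countB (partitions.map (fun pr => pr.2.length)) r : Int)).toNat ≤ fuel) :
    repartitionLoop fuel (emit partitions r) min_pcount
      = emit partitions
          (rloopB (partitions.map (fun pr => pr.2.length)) min_pcount fuel r) := by
  induction fuel generalizing r with
  | zero => simp [repartitionLoop, rloopB]
  | succ fuel ih =>
    have hc := length_emit partitions r
    have hc' := length_emit partitions (r + 1)
    have hmono := countB_mono (partitions.map (fun pr => pr.2.length)) r
    rw [repartitionLoop, rloopB]
    by_cases h1 : ((countB (partitions.map (fun pr => pr.2.length)) r : Int)) < min_pcount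
    · have hl : ((emit partitions r).length : Int) < min_pcount := by omega
      rw [if_pos hl]
      simp only [stepA_emit]
      by_cases h2 : countB (partitions.map (fun pr => pr.2.length)) (r + 1)
          > countB (partitions.map (fun pr => pr.2.length)) r
      · have hlen : ¬ (emit partitions (r + 1)).length = (emit partitions r).length := by omega
        rw [if_neg hlen, if_pos ⟨h1, h2⟩]
        apply ih
        omega
      · have hlen : (emit partitions (r + 1)).length = (emit partitions r).length := by omega
        rw [if_pos hlen, if_neg]
        intro hand
        exact h2 hand.2
    · have hl : ¬ ((emit partitions r).length : Int) < min_pcount := by omega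
      rw [if_neg hl, if_neg]
      intro hand
      exact h1 hand.1

-- ===== VERDICT (by name: the statement is the Claim_ definition above) =====
theorem repartition_spec : Claim_equal_repartition := by
  intro partitions min_pcount _hdom
  unfold Spec_repartition repartition repartition_alt
  simp only [countB_zero, List.length_map]
  have h := loop_emit partitions min_pcount
      (min_pcount - (partitions.length : Int)).toNat 0
      (le_of_eq (by rw [countB_zero, List.length_map]))
  rw [emit_zero] at h
  simp only [h, emit]
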